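-- pv_equiv track=rewrite | github.com/lzcjsyr/Book_Recap | core/video_composer.py | _split_text_evenly
-- ===== SOURCE A (Python) =====
-- from typing import List, Dict, Any, Optional, Tuple
--
-- def _split_text_evenly(text: str, max_chars_per_line: int) -> List[str]:
--     """将文本均匀切分"""
--     if len(text) <= max_chars_per_line:
--         return [text]
--
--     total_chars = len(text)
--     num_segments = (total_chars + max_chars_per_line - 1) // max_chars_per_line
--
--     base_length = total_chars // num_segments
--     remainder = total_chars % num_segments
--
--     result = []
--     start = 0
--
--     for i in range(num_segments):
--         length = base_length + (1 if i < remainder else 0)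
--         end = start + length
--         result.append(text[start:end])
--         start = end
--
--     return result
-- ===== SOURCE B (Python) =====
-- from typing import List
--
-- def _split_text_evenly(text: str, max_chars_per_line: int) -> List[str]:
--     """将文本均匀切分 — greedy even split: at each step take ceil(len(rest)/segments_left) chars."""
--     if len(text) <= max_chars_per_line:
--         return [text]
--
--     k = (len(text) + max_chars_per_line - 1) // max_chars_per_line
--     result = []
--     rest = text
--     while k > 0:
--         cut = -(-len(rest) // k)
--         result.append(rest[:cut])
--         rest = rest[cut:]
--         k -= 1
--     return result
-- ===== Notes on version B (the rewrite author's own statement) =====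
-- stated objective: alternative
-- what changed: Instead of precomputing base_length/remainder and threading a start cursor with a per-index '+1 if i < remainder' branch, B greedily takes ceil(len(rest)/segments_left) characters off the front of the remaining string each step.
import Mathlib
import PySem

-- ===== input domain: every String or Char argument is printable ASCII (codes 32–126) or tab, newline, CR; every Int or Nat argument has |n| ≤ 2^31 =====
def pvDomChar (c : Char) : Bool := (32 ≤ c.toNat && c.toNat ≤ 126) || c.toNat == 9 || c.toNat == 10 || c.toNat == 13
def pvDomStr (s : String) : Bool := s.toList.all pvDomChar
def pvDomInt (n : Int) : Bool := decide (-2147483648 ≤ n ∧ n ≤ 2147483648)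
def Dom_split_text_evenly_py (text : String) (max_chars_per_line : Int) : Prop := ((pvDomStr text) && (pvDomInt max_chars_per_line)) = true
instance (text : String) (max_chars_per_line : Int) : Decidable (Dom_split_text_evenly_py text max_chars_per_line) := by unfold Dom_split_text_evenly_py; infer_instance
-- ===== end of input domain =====

-- B replaces A's precomputed base/remainder loop with a greedy split that takes
-- ceil(len(rest)/segments_left) characters per step (objective: alternative algorithm, same cost).

-- ===== PORT A =====
def split_text_evenly_py (text : String) (max_chars_per_line : Int) : List String :=
  if PySem.Str.len text ≤ max_chars_per_line then [text]
  else
    let total_chars := PySem.Str.len text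
    let num_segments := PySem.Int.floordiv (total_chars + max_chars_per_line - 1) max_chars_per_line
    let base_length := PySem.Int.floordiv total_chars num_segments
    let remainder := PySem.Int.mod total_chars num_segments
    ((PySem.List.pyRange 0 num_segments 1).foldl
      (fun (st : List String × Int) i =>
        let length := base_length + (if i < remainder then 1 else 0)
        let e := st.2 + length
        (st.1 ++ [PySem.Str.slice text (some st.2) (some e)], e))
      ([], 0)).1

-- ===== PORT B =====
-- the 'while k > 0' loop of Source B
def splitAltLoop (rest : String) (k : Int) (result : List String) : List String :=
  if 0 < k then
    let cut := -(PySem.Int.floordiv (-(PySem.Str.len rest)) k)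
    splitAltLoop (PySem.Str.slice rest (some cut) none) (k - 1)
      (result ++ [PySem.Str.slice rest none (some cut)])
  else result
termination_by k.toNat
decreasing_by omega

def split_text_evenly_py_alt (text : String) (max_chars_per_line : Int) : List String :=
  if PySem.Str.len text ≤ max_chars_per_line then [text]
  else
    splitAltLoop text
      (PySem.Int.floordiv (PySem.Str.len text + max_chars_per_line - 1) max_chars_per_line) []

-- ===== PRECONDITION & SPEC =====
-- Pre_ excludes exactly the inputs where Python A raises ZeroDivisionError: max_chars_per_line = 0
-- with nonempty text, and max_chars_per_line < 0 with 2 ≤ len(text) ≤ 1 - max_chars_per_line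
-- (there A's computed num_segments is 0 and 'total // num_segments' divides by zero).
def Pre_split_text_evenly_py (text : String) (max_chars_per_line : Int) : Prop :=
  1 ≤ max_chars_per_line ∨ (text.toList.length : Int) ≤ max_chars_per_line ∨
    (max_chars_per_line ≤ -1 ∧
      ((text.toList.length : Int) ≤ 1 ∨ 2 - max_chars_per_line ≤ (text.toList.length : Int)))
instance (text : String) (max_chars_per_line : Int) : Decidable (Pre_split_text_evenly_py text max_chars_per_line) := by unfold Pre_split_text_evenly_py; infer_instance

def pvWitness_split_text_evenly_py : String × Int := ("hello world", 3)


def Spec_split_text_evenly_py (text : String) (max_chars_per_line : Int) (out : List String) : Prop := out = split_text_evenly_py_alt text max_chars_per_line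
instance (text : String) (max_chars_per_line : Int) (out : List String) : Decidable (Spec_split_text_evenly_py text max_chars_per_line out) := by unfold Spec_split_text_evenly_py; infer_instance

-- ===== CLAIM (what is proved, stated in full; the proofs are below) =====
def Claim_equal_split_text_evenly_py : Prop := ∀ (text : String) (max_chars_per_line : Int), Dom_split_text_evenly_py text max_chars_per_line → Pre_split_text_evenly_py text max_chars_per_line → Spec_split_text_evenly_py text max_chars_per_line (split_text_evenly_py text max_chars_per_line)


-- ===== LEMMAS AND PROOFS =====

-- The common loop invariant: after A has emitted segments for indices < i (cursor at s),
-- the remaining text has length j*base + max(rem-i,0); both loops then emit the same segments.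
lemma split_loops_eq (text : String) (base rem : Int) (hbase : 0 ≤ base) :
    ∀ (j : Nat) (i s : Int) (acc : List String),
      0 ≤ s → 0 ≤ i → max (rem - i) 0 ≤ (j : Int) →
      (text.toList.length : Int) - s = (j : Int) * base + max (rem - i) 0 →
      ((PySem.List.pyRange i (i + (j : Int)) 1).foldl
          (fun (st : List String × Int) x =>
            (st.1 ++ [PySem.Str.slice text (some st.2)
                (some (st.2 + (base + (if x < rem then 1 else 0))))],
             st.2 + (base + (if x < rem then 1 else 0))))
          (acc, s)).1
        = splitAltLoop (PySem.Str.slice text (some s) none) (j : Int) acc := by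
  intro j
  induction j with
  | zero =>
    intro i s acc _ _ _ _
    rw [PySem.List.pyRange_one_eq_nil (by omega)]
    rw [splitAltLoop]
    simp
  | succ j ih =>
    intro i s acc hs hi hmax hR
    set r : Int := max (rem - i) 0 with hr
    have hjcast : ((j + 1 : Nat) : Int) = (j : Int) + 1 := by push_cast; ring
    have hjb : 0 ≤ (j : Int) * base := mul_nonneg (by positivity) hbase
    have hRlen : s ≤ (text.toList.length : Int) := by
      have : 0 ≤ ((j + 1 : Nat) : Int) * base := mul_nonneg (by positivity) hbase
      omega
    -- the length of the remaining string
    have hrestlen : PySem.Str.len (PySem.Str.slice text (some s) none)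
        = (text.toList.length : Int) - s := by
      rw [PySem.Str.len_eq, PySem.Str.toList_slice, PySem.Chars.slice_eq_listSlice,
        PySem.List.slice_from _ hs]
      push_cast [List.length_drop]
      omega
    -- the ceiling cut of B equals A's 'base + (1 if i < rem else 0)'
    have hcut : -(PySem.Int.floordiv (-(PySem.Str.len (PySem.Str.slice text (some s) none)))
          ((j + 1 : Nat) : Int)) = base + (if i < rem then 1 else 0) := by
      rw [hrestlen, PySem.Int.neg_floordiv_neg_eq_iff_of_pos (by positivity)]
      have hexp : ((j + 1 : Nat) : Int) * base = (j : Int) * base + base := by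
        rw [hjcast]; ring
      by_cases hir : i < rem
      · have hrpos : 0 < r := by omega
        rw [if_pos hir]
        constructor
        · have : (base + 1 - 1) * ((j + 1 : Nat) : Int) = (j : Int) * base + base := by
            rw [hjcast]; ring
          rw [this]; omega
        · have : (base + 1) * ((j + 1 : Nat) : Int) = (j : Int) * base + base + (j : Int) + 1 := by
            rw [hjcast]; ring
          rw [this]; omega
      · have hrzero : r = 0 := by omega
        rw [if_neg hir]
        simp only [add_zero]
        constructor
        · have : (base - 1) * ((j + 1 : Nat) : Int) = (j : Int) * base + base - (j : Int) - 1 := by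
            rw [hjcast]; ring
          rw [this]; omega
        · have : base * ((j + 1 : Nat) : Int) = (j : Int) * base + base := by
            rw [hjcast]; ring
          rw [this]; omega
    set cut : Int := base + (if i < rem then 1 else 0) with hcutdef
    have hcutnn : 0 ≤ cut := by rw [hcutdef]; split_ifs <;> omega
    -- unfold one step of A's loop
    rw [PySem.List.pyRange_one_cons (by omega)]
    rw [List.foldl_cons]
    -- unfold one step of B's loop
    rw [splitAltLoop, if_pos (by positivity : (0 : Int) < ((j + 1 : Nat) : Int))]
    rw [hcut]
    -- B's emitted piece equals A's emitted slice
    have hpiece : PySem.Str.slice (PySem.Str.slice text (some s) none) none (some cut)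
        = PySem.Str.slice text (some s) (some (s + cut)) := by
      apply String.toList_inj.mp
      rw [PySem.Str.toList_slice, PySem.Str.toList_slice, PySem.Str.toList_slice]
      simp only [PySem.Chars.slice_eq_listSlice]
      rw [PySem.List.slice_from _ hs, PySem.List.slice_to _ hcutnn,
        PySem.List.slice_toNat _ hs (by omega : (0:Int) ≤ s + cut)]
      congr 1
      omega
    -- B's new rest equals the slice of text from the new cursor
    have hrest : PySem.Str.slice (PySem.Str.slice text (some s) none) (some cut) none
        = PySem.Str.slice text (some (s + cut)) none := by
      apply String.toList_inj.mp
      rw [PySem.Str.toList_slice, PySem.Str.toList_slice, PySem.Str.toList_slice]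
      simp only [PySem.Chars.slice_eq_listSlice]
      rw [PySem.List.slice_from _ hs, PySem.List.slice_from _ hcutnn,
        PySem.List.slice_from _ (by omega : (0:Int) ≤ s + cut), List.drop_drop]
      congr 1
      omega
    have hshift : i + ((j + 1 : Nat) : Int) = (i + 1) + (j : Int) := by rw [hjcast]; ring
    have hdec : ((j + 1 : Nat) : Int) - 1 = (j : Int) := by omega
    simp only [hpiece, hrest, hshift, hdec]
    apply ih (i + 1) (s + cut) (acc ++ [PySem.Str.slice text (some s) (some (s + cut))])
      (by omega) (by omega) (by rw [hcutdef] at *; split_ifs at * <;> omega)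
    · have hexp : ((j + 1 : Nat) : Int) * base = (j : Int) * base + base := by
        rw [hjcast]; ring
      rw [hexp] at hR
      rw [hcutdef] at *
      split_ifs at * <;> omega

-- slicing text from 0 is text itself
lemma slice_zero_self (text : String) : PySem.Str.slice text (some 0) none = text := by
  apply String.toList_inj.mp
  rw [PySem.Str.toList_slice, PySem.Chars.slice_eq_listSlice,
    PySem.List.slice_from _ (by omega : (0:Int) ≤ 0)]
  simp

-- main equivalence: the two ports agree on ALL inputs (the Lean ports are total)
lemma split_text_evenly_eq (text : String) (m : Int) :
    split_text_evenly_py text m = split_text_evenly_py_alt text m := by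
  unfold split_text_evenly_py split_text_evenly_py_alt
  by_cases hle : PySem.Str.len text ≤ m
  · rw [if_pos hle, if_pos hle]
  · rw [if_neg hle, if_neg hle]
    simp only []
    set n : Int := PySem.Str.len text with hn
    have hnlen : n = (text.toList.length : Int) := PySem.Str.len_eq text
    set k : Int := PySem.Int.floordiv (n + m - 1) m with hk
    by_cases hkpos : 1 ≤ k
    · set base : Int := PySem.Int.floordiv n k with hbase
      set rem : Int := PySem.Int.mod n k with hrem
      have hn0 : 0 ≤ n := by rw [hnlen]; positivity
      have hb0 : 0 ≤ base := by
        rw [hbase, PySem.Int.floordiv_eq_ediv_of_pos (by omega)]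
        exact Int.ediv_nonneg hn0 (by omega)
      have hdiv : base * k + rem = n := PySem.Int.floordiv_mul_add_mod n k
      have hrem0 : 0 ≤ rem := PySem.Int.mod_nonneg n (by omega)
      have hremk : rem < k := PySem.Int.mod_lt n (by omega)
      have hkcast : ((k.toNat : Nat) : Int) = k := by omega
      have := split_loops_eq text base rem hb0 k.toNat 0 0 []
        (by omega) (by omega) (by omega)
        (by rw [← hnlen]
            have : ((k.toNat : Nat) : Int) * base = base * k := by rw [hkcast]; ring
            omega)
      rw [slice_zero_self, hkcast, zero_add] at this
      exact this
    · rw [PySem.List.pyRange_one_eq_nil (by omega)]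
      rw [splitAltLoop, if_neg (by omega)]
      simp

-- ===== VERDICT (by name: the statement is the Claim_ definition above) =====
theorem split_text_evenly_py_spec : Claim_equal_split_text_evenly_py := by
  intro text m _ _
  unfold Spec_split_text_evenly_py
  exact split_text_evenly_eq text m
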